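-- pv_equiv track=rewrite | github.com/devanshg03/CSC108 | Week 4/while_loops.py | find_letter_n_times
-- ===== SOURCE A (Python) =====
-- def find_letter_n_times(s: str, letter: str, n: int) -> str:
--     """Return the smallest substring of s starting from index 0 that contains
--     n occurrences of letter.
--
--     Precondition: letter occurs at least n times in s
--
--     >>> find_letter_n_times('Computer Science', 'e', 2)
--     'Computer Scie'
--     """
--
--     i = 0  # The index of the next character to examine.
--     count = 0  # The number of occurrences of letter in s[:i].
--
--     while i < len(s) and count < n:
--         if s[i] == letter:
--             count = count + 1
--         i = i + 1
--
--     return s[:i]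
-- ===== SOURCE B (Python) =====
-- def find_letter_n_times(s: str, letter: str, n: int) -> str:
--     if n <= 0:
--         return ''
--     positions = [i for i, c in enumerate(s) if c == letter]
--     if len(positions) >= n:
--         return s[:positions[n - 1] + 1]
--     return s
-- ===== Notes on version B (the rewrite author's own statement) =====
-- stated objective: alternative
-- what changed: Replaces the early-stopping index/counter while-loop with a single comprehension pass building the list of occurrence positions followed by an O(1) lookup of the n-th one and a slice.
import Mathlib
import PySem

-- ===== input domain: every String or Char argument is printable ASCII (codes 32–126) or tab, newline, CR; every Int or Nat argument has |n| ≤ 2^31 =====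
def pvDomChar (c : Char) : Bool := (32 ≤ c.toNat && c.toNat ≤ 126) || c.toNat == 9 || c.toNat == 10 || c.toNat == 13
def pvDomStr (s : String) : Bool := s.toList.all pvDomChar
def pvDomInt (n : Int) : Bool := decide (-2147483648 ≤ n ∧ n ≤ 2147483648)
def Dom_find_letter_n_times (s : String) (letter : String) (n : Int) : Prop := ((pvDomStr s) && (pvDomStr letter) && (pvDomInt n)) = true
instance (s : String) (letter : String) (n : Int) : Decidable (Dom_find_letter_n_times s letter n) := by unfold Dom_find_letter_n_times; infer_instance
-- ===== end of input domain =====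

-- B replaces A's early-stopping index/counter while-loop by one pass collecting all
-- occurrence positions and an O(1) lookup of the n-th one (objective: alternative).

-- ===== PORT A =====
-- the while-loop: state (i, count), returns the final i
def findA_loop (cs : List Char) (letter : String) (n : Int) (i : Nat) (count : Int) : Nat :=
  if h : i < cs.length ∧ count < n then
    findA_loop cs letter n (i + 1)
      (if String.ofList [cs[i]'h.1] == letter then count + 1 else count)
  else i
termination_by cs.length - i

def find_letter_n_times (s : String) (letter : String) (n : Int) : String :=
  String.ofList (s.toList.take (findA_loop s.toList letter n 0 0))   -- s[:i] with 0 ≤ i: exact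

-- ===== PORT B =====
def find_letter_n_times_alt (s : String) (letter : String) (n : Int) : String :=
  if n ≤ 0 then "" else
    let positions : List Int :=
      ((PySem.List.enumerate s.toList).filter (fun p => String.ofList [p.2] == letter)).map (·.1)
    if (positions.length : Int) ≥ n then
      -- positions[n-1] is in range under this branch; entries are ≥ 0, so s[:p+1] = take (p+1)
      String.ofList (s.toList.take ((positions.getD (n - 1).toNat 0) + 1).toNat)
    else s

-- ===== PRECONDITION & SPEC =====
def Spec_find_letter_n_times (s : String) (letter : String) (n : Int) (out : String) : Prop := out = find_letter_n_times_alt s letter n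
instance (s : String) (letter : String) (n : Int) (out : String) : Decidable (Spec_find_letter_n_times s letter n out) := by unfold Spec_find_letter_n_times; infer_instance

-- ===== CLAIM (what is proved, stated in full; the proofs are below) =====
def Claim_equal_find_letter_n_times : Prop := ∀ (s : String) (letter : String) (n : Int), Dom_find_letter_n_times s letter n → Spec_find_letter_n_times s letter n (find_letter_n_times s letter n)

-- ===== LEMMAS AND PROOFS =====

-- structural version of A's loop: how many characters the loop consumes
def loopS (letter : String) : List Char → Int → Nat
  | [], _ => 0
  | c :: t, m =>
    if 0 < m then 1 + loopS letter t (if String.ofList [c] == letter then m - 1 else m) else 0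

-- structural version of B's position list
def posL (letter : String) : List Char → List Int
  | [] => []
  | c :: t =>
    if String.ofList [c] == letter then 0 :: (posL letter t).map (· + 1)
    else (posL letter t).map (· + 1)

theorem loopS_nonpos (letter : String) (cs : List Char) (m : Int) (hm : ¬ 0 < m) :
    loopS letter cs m = 0 := by
  cases cs <;> simp [loopS, hm]

theorem findA_loop_eq (cs : List Char) (letter : String) (n : Int) (i : Nat) (count : Int) :
    findA_loop cs letter n i count = i + loopS letter (cs.drop i) (n - count) := by
  fun_induction findA_loop cs letter n i count with
  | case1 i count h ih =>
    rw [List.drop_eq_getElem_cons h.1]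
    have hm : 0 < n - count := by omega
    rw [loopS, if_pos hm]
    simp only [dite_eq_ite] at ih
    by_cases hc : (String.ofList [cs[i]'h.1] == letter) = true
    · simp only [if_pos hc] at ih ⊢
      rw [ih, show n - (count + 1) = n - count - 1 from by omega]
      omega
    · simp only [if_neg hc] at ih ⊢
      rw [ih]; omega
  | case2 i count h =>
    rcases Nat.lt_or_ge i cs.length with hi | hi
    · rw [loopS_nonpos _ _ _ (by omega)]; omega
    · rw [List.drop_eq_nil_of_le hi]; simp [loopS]

theorem posL_mem_nonneg (letter : String) (cs : List Char) :
    ∀ x ∈ posL letter cs, 0 ≤ x := by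
  induction cs with
  | nil => simp [posL]
  | cons c t ih =>
    intro x hx
    simp only [posL] at hx
    split at hx <;> simp only [List.mem_cons, List.mem_map] at hx
    · rcases hx with rfl | ⟨y, hy, rfl⟩
      · omega
      · have := ih y hy; omega
    · rcases hx with ⟨y, hy, rfl⟩
      have := ih y hy; omega

theorem positions_eq (letter : String) (cs : List Char) (s : Int) :
    ((PySem.List.enumerate cs s).filter (fun p => String.ofList [p.2] == letter)).map (·.1)
      = (posL letter cs).map (· + s) := by
  induction cs generalizing s with
  | nil => simp [PySem.List.enumerate_nil, posL]
  | cons c t ih =>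
    rw [PySem.List.enumerate_cons]
    simp only [List.filter_cons, posL]
    by_cases hc : (String.ofList [c] == letter) = true
    · rw [if_pos hc, if_pos hc, List.map_cons, ih, List.map_cons, List.map_map]
      refine List.cons_eq_cons.mpr ⟨by omega, ?_⟩
      apply List.map_congr_left
      intro x _
      simp only [Function.comp_apply]
      omega
    · rw [if_neg hc, if_neg hc, ih, List.map_map]
      apply List.map_congr_left
      intro x _
      simp only [Function.comp_apply]
      omega

theorem getD_map_add_one (l : List Int) (k : Nat) (hk : k < l.length) :
    (l.map (· + 1)).getD k 0 = l.getD k 0 + 1 := by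
  simp [List.getD_eq_getElem?_getD, List.getElem?_eq_getElem hk]

theorem getD_mem_of_lt (l : List Int) (k : Nat) (hk : k < l.length) :
    l.getD k 0 ∈ l := by
  rw [List.getD_eq_getElem?_getD, List.getElem?_eq_getElem hk]
  simp [List.getElem_mem]

theorem take_loopS (letter : String) (cs : List Char) (m : Int) (hm : 0 < m) :
    cs.take (loopS letter cs m) =
      if (((posL letter cs).length : Int) ≥ m) then
        cs.take (((posL letter cs).getD (m - 1).toNat 0) + 1).toNat
      else cs := by
  induction cs generalizing m with
  | nil =>
    rw [loopS, posL, if_neg (by simp; omega)]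
    simp
  | cons c t ih =>
    rw [loopS, if_pos hm]
    simp only [posL]
    by_cases hc : (String.ofList [c] == letter) = true
    · rw [if_pos hc, if_pos hc]
      by_cases h1 : m = 1
      · subst h1
        rw [loopS_nonpos _ _ _ (by omega)]
        rw [if_pos (by simp only [List.length_cons]; push_cast; omega)]
        norm_num
      · have hm1 : 0 < m - 1 := by omega
        have key := ih (m - 1) hm1
        have hL : List.take (1 + loopS letter t (m - 1)) (c :: t)
            = c :: List.take (loopS letter t (m - 1)) t := by
          rw [Nat.add_comm, List.take_succ_cons]
        rw [hL, key]
        by_cases hlen : ((posL letter t).length : Int) ≥ m - 1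
        · rw [if_pos hlen, if_pos (by simp only [List.length_cons, List.length_map]; push_cast; omega)]
          have hk : (m - 2).toNat < (posL letter t).length := by omega
          have hidx : (m - 1).toNat = (m - 2).toNat + 1 := by omega
          rw [hidx, List.getD_cons_succ, getD_map_add_one _ _ hk]
          have hnn : 0 ≤ (posL letter t).getD (m - 2).toNat 0 :=
            posL_mem_nonneg letter t _ (getD_mem_of_lt _ _ hk)
          have h2 : ((posL letter t).getD (m - 2).toNat 0 + 1 + 1).toNat
              = ((posL letter t).getD (m - 2).toNat 0 + 1).toNat + 1 := by omega
          rw [h2, List.take_succ_cons]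
          have h3 : (m - 1 - 1).toNat = (m - 2).toNat := by omega
          rw [h3]
        · rw [if_neg hlen, if_neg (by simp only [List.length_cons, List.length_map]; push_cast; omega)]
    · rw [if_neg hc, if_neg hc]
      have hL : List.take (1 + loopS letter t m) (c :: t)
          = c :: List.take (loopS letter t m) t := by
        rw [Nat.add_comm, List.take_succ_cons]
      rw [hL, ih m hm, List.length_map]
      by_cases hlen : ((posL letter t).length : Int) ≥ m
      · rw [if_pos hlen, if_pos hlen]
        have hk : (m - 1).toNat < (posL letter t).length := by omega
        rw [getD_map_add_one _ _ hk]
        have hnn : 0 ≤ (posL letter t).getD (m - 1).toNat 0 :=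
          posL_mem_nonneg letter t _ (getD_mem_of_lt _ _ hk)
        have h2 : ((posL letter t).getD (m - 1).toNat 0 + 1 + 1).toNat
            = ((posL letter t).getD (m - 1).toNat 0 + 1).toNat + 1 := by omega
        rw [h2, List.take_succ_cons]
      · rw [if_neg hlen, if_neg hlen]

-- ===== VERDICT (by name: the statement is the Claim_ definition above) =====
theorem find_letter_n_times_spec : Claim_equal_find_letter_n_times := by
  intro s letter n _
  unfold Spec_find_letter_n_times find_letter_n_times find_letter_n_times_alt
  rw [findA_loop_eq]
  simp only [List.drop_zero, Int.sub_zero, Nat.zero_add]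
  by_cases hn : n ≤ 0
  · rw [if_pos hn, loopS_nonpos _ _ _ (by omega)]
    rfl
  · rw [if_neg hn]
    have hpos : ((PySem.List.enumerate s.toList).filter
        (fun p => String.ofList [p.2] == letter)).map (·.1) = posL letter s.toList := by
      rw [positions_eq letter s.toList 0]
      simp
    simp only [hpos]
    rw [take_loopS letter s.toList n (by omega)]
    by_cases hlen : (((posL letter s.toList).length : Int) ≥ n)
    · rw [if_pos hlen, if_pos hlen]
    · rw [if_neg hlen, if_neg hlen]
      exact String.ofList_toList
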